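-- pv_equiv track=rewrite | github.com/PhellypeMiranda/To-Do-List | funcs.py | count
-- ===== SOURCE A (Python) =====
-- def count(items_list):
--     check = {
--         "finished": 0,
--         "unfinished": 0
--     }
--     for item in items_list:
--         if item["checked"] == 1:
--             check["finished"] += 1
--         else:
--             check["unfinished"] += 1
--     return check
-- ===== SOURCE B (Python) =====
-- def count(items_list):
--     # divide and conquer: count each half independently and add the pair sums
--     def go(lo, hi):
--         if hi - lo == 0:
--             return (0, 0)
--         if hi - lo == 1:
--             fin = 1 if items_list[lo]["checked"] == 1 else 0
--             return (fin, 1 - fin)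
--         mid = (lo + hi) // 2
--         lf, lu = go(lo, mid)
--         rf, ru = go(mid, hi)
--         return (lf + rf, lu + ru)
--     finished, unfinished = go(0, len(items_list))
--     return {"finished": finished, "unfinished": unfinished}
-- ===== Notes on version B (the rewrite author's own statement) =====
-- stated objective: alternative
-- what changed: Replaces the left-to-right loop with two mutable counters by a divide-and-conquer recursion on index halves that counts each half independently and adds the (finished, unfinished) pairs.
import Mathlib
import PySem

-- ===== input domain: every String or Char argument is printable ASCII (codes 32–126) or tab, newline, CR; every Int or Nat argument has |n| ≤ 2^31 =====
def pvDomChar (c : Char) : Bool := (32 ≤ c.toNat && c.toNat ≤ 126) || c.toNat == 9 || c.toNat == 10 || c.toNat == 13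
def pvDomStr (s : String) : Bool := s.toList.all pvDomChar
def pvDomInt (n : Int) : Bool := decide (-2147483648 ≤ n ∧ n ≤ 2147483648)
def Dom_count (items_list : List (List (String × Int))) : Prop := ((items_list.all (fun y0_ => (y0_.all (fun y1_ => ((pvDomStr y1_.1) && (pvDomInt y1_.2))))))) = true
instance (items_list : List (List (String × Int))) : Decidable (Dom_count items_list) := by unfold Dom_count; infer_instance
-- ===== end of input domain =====

-- B counts via divide-and-conquer on index halves, adding the (finished, unfinished) pairs, instead of A's left-to-right loop over two mutable counters.

-- ===== PORT A =====
-- the loop body: item["checked"] (first-match lookup), then += on the matching counter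
def countStep (d : PySem.Dict String Int) (item : List (String × Int)) : PySem.Dict String Int :=
  match (PySem.Dict.mk item).get? "checked" with
  | some v => if v = 1 then d.modify "finished" 0 (· + 1) else d.modify "unfinished" 0 (· + 1)
  | none => d  -- Python raises KeyError here; excluded by Pre_count

def count (items_list : List (List (String × Int))) : List (String × Int) :=
  (items_list.foldl countStep (PySem.Dict.mk [("finished", 0), ("unfinished", 0)])).items

-- ===== PORT B =====
-- go(lo, hi): counts of the half-open index range [lo, hi); the '.getD []' only totalises the
-- in-range items_list[lo] (lo < length whenever go is reached with hi - lo = 1 from count_alt)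
def countGo (items_list : List (List (String × Int))) (lo hi : Nat) : Int × Int :=
  if _h0 : hi - lo = 0 then (0, 0)
  else if _h1 : hi - lo = 1 then
    let fin : Int :=
      if (PySem.Dict.mk ((PySem.List.pyGet? items_list (lo : Int)).getD [])).get? "checked" = some 1
      then 1 else 0
    (fin, 1 - fin)
  else
    let mid := (lo + hi) / 2
    let l := countGo items_list lo mid
    let r := countGo items_list mid hi
    (l.1 + r.1, l.2 + r.2)
termination_by hi - lo
decreasing_by all_goals omega

def count_alt (items_list : List (List (String × Int))) : List (String × Int) :=
  let p := countGo items_list 0 items_list.length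
  [("finished", p.1), ("unfinished", p.2)]

-- ===== PRECONDITION & SPEC =====
-- Pre_ excludes exactly the inputs where item["checked"] raises KeyError (in A, and in B alike)
def Pre_count (items_list : List (List (String × Int))) : Prop :=
  ∀ item ∈ items_list, ((PySem.Dict.mk item).get? "checked").isSome = true

instance (items_list : List (List (String × Int))) : Decidable (Pre_count items_list) := by
  unfold Pre_count; infer_instance

def pvWitness_count : (List (List (String × Int))) := [[("checked", 1)], [("checked", 0), ("x", 7)]]

def Spec_count (items_list : List (List (String × Int))) (out : List (String × Int)) : Prop := out = count_alt items_list
instance (items_list : List (List (String × Int))) (out : List (String × Int)) : Decidable (Spec_count items_list out) := by unfold Spec_count; infer_instance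

-- ===== CLAIM (what is proved, stated in full; the proofs are below) =====
def Claim_equal_count : Prop := ∀ (items_list : List (List (String × Int))), Dom_count items_list → Pre_count items_list → Spec_count items_list (count items_list)

-- ===== LEMMAS AND PROOFS =====

def pvPred (item : List (String × Int)) : Bool :=
  (PySem.Dict.mk item).get? "checked" == some 1

-- A's loop accumulates the two counts left to right
lemma count_invariant (l : List (List (String × Int))) :
    ∀ f u : Int, (∀ item ∈ l, ((PySem.Dict.mk item).get? "checked").isSome = true) →
      l.foldl countStep (PySem.Dict.mk [("finished", f), ("unfinished", u)]) =
        PySem.Dict.mk [("finished", f + l.countP pvPred),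
                       ("unfinished", u + l.countP (fun x => ! pvPred x))] := by
  induction l with
  | nil => intro f u _; simp
  | cons hd tl ih =>
    intro f u hpre
    have hhd := hpre hd (List.mem_cons_self)
    have htl : ∀ item ∈ tl, ((PySem.Dict.mk item).get? "checked").isSome = true :=
      fun item hm => hpre item (List.mem_cons_of_mem _ hm)
    obtain ⟨v, hv⟩ := Option.isSome_iff_exists.mp hhd
    simp only [List.foldl_cons]
    by_cases h1 : v = 1
    · have hstep : countStep (PySem.Dict.mk [("finished", f), ("unfinished", u)]) hd =
          PySem.Dict.mk [("finished", f + 1), ("unfinished", u)] := by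
        unfold countStep
        rw [hv]
        simp [h1, PySem.Dict.modify, PySem.Dict.getD, PySem.Dict.get?, PySem.Dict.insert,
          PySem.Dict.contains]
      have hp : pvPred hd = true := by simp [pvPred, hv, h1]
      rw [hstep, ih (f + 1) u htl]
      simp [hp]
      ring_nf
    · have hstep : countStep (PySem.Dict.mk [("finished", f), ("unfinished", u)]) hd =
          PySem.Dict.mk [("finished", f), ("unfinished", u + 1)] := by
        unfold countStep
        rw [hv]
        simp [h1, PySem.Dict.modify, PySem.Dict.getD, PySem.Dict.get?, PySem.Dict.insert,
          PySem.Dict.contains]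
      have hp : pvPred hd = false := by simp [pvPred, hv, h1]
      rw [hstep, ih f (u + 1) htl]
      simp [hp]
      ring_nf

-- B's recursion computes the counts of the slice [lo, hi)
lemma countGo_eq (items : List (List (String × Int))) :
    ∀ n lo hi, hi - lo = n → hi ≤ items.length →
      countGo items lo hi =
        ((((items.drop lo).take (hi - lo)).countP pvPred : Int),
         (((items.drop lo).take (hi - lo)).countP (fun x => ! pvPred x) : Int)) := by
  intro n
  induction n using Nat.strong_induction_on with
  | _ n ih =>
    intro lo hi hn hlen
    rw [countGo]
    by_cases h0 : hi - lo = 0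
    · simp [h0]
    · by_cases h1 : hi - lo = 1
      · have hlo : lo < items.length := by omega
        have hget : PySem.List.pyGet? items (lo : Int) = some items[lo] := by
          simp [List.getElem?_eq_getElem hlo]
        have hdt : (items.drop lo).take 1 = [items[lo]] := by
          rw [List.drop_eq_getElem_cons hlo]
          rfl
        simp only [h1, hget, Option.getD_some, hdt]
        norm_num
        by_cases hp : (PySem.Dict.mk items[lo]).get? "checked" = some 1
        · simp [hp, pvPred]
        · simp [hp, pvPred]
      · have hlt : lo < hi := by omega
        have h2 : 2 ≤ hi - lo := by omega
        set mid := (lo + hi) / 2 with hmid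
        have hb1 : lo < mid := by omega
        have hb2 : mid < hi := by omega
        have ihl := ih (mid - lo) (by omega) lo mid rfl (by omega)
        have ihr := ih (hi - mid) (by omega) mid hi rfl hlen
        have hsplit : (items.drop lo).take (hi - lo) =
            (items.drop lo).take (mid - lo) ++ (items.drop mid).take (hi - mid) := by
          have hadd : hi - lo = (mid - lo) + (hi - mid) := by omega
          rw [hadd, List.take_add, List.drop_drop]
          have hmm : lo + (mid - lo) = mid := by omega
          rw [hmm]
        simp only [h0, h1, ihl, ihr, hsplit, List.countP_append]
        push_cast
        rfl

-- ===== VERDICT (by name: the statement is the Claim_ definition above) =====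
theorem count_spec : Claim_equal_count := by
  intro items_list _ hpre
  unfold Spec_count count count_alt
  rw [count_invariant items_list 0 0 hpre,
      countGo_eq items_list items_list.length 0 items_list.length rfl le_rfl]
  simp
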